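-- pv_equiv track=rewrite | github.com/Ameya-P/CodePath_TIP102 | Unit_2/Unit2_Session1.py | find_common_signals
-- ===== SOURCE A (Python) =====
-- def find_common_signals(signals1, signals2):
--     set1 = set(signals1)
--     set2 = set(signals2)
--
--     common_elements = set1 & set2
--
--     i = 0
--     j = 0
--
--     for element in common_elements:
--         i += signals1.count(element)
--         j += signals2.count(element)
--
--     return [i, j]
-- ===== SOURCE B (Python) =====
-- def find_common_signals(signals1, signals2):
--     common = set(signals1) & set(signals2)
--     i = sum(1 for x in signals1 if x in common)
--     j = sum(1 for x in signals2 if x in common)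
--     return [i, j]
-- ===== Notes on version B (the rewrite author's own statement) =====
-- stated objective: faster
-- what changed: Instead of looping over the common-element set and rescanning each list with .count per element, B makes one membership-filtered pass over each input list against the intersection set.
import Mathlib
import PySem

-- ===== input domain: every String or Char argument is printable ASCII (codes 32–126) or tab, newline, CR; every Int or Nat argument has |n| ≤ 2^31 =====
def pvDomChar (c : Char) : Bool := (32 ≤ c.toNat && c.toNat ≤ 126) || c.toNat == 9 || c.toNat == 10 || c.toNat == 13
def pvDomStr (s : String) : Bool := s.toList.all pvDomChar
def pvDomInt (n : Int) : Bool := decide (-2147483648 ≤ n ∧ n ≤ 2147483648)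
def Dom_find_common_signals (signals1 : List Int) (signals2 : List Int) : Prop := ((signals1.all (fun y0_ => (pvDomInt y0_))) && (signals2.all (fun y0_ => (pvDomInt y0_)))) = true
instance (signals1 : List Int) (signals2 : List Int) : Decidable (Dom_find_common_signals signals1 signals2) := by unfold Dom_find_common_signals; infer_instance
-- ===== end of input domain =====

-- B builds the intersection set once and counts with one membership-filtered pass
-- over each input list, instead of rescanning each list with .count per common element (faster).


-- ===== PORT A =====
-- for element in common_elements: i += signals1.count(element); j += signals2.count(element)
-- (iterates the set; result is two sums, hence independent of Python's hash order)
def find_common_signals (signals1 : List Int) (signals2 : List Int) : List Int :=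
  let set1 := PySem.Set.ofList signals1
  let set2 := PySem.Set.ofList signals2
  let common_elements := PySem.Set.inter set1 set2
  let ij := common_elements.foldl
    (fun (p : Int × Int) element =>
      (p.1 + (signals1.count element : Int), p.2 + (signals2.count element : Int)))
    (0, 0)
  [ij.1, ij.2]

-- ===== PORT B =====
def find_common_signals_alt (signals1 : List Int) (signals2 : List Int) : List Int :=
  let common := PySem.Set.inter (PySem.Set.ofList signals1) (PySem.Set.ofList signals2)
  let i := signals1.foldl (fun acc x => if PySem.Set.contains common x then acc + 1 else acc) (0 : Int)
  let j := signals2.foldl (fun acc x => if PySem.Set.contains common x then acc + 1 else acc) (0 : Int)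
  [i, j]

-- ===== PRECONDITION & SPEC =====
def Spec_find_common_signals (signals1 : List Int) (signals2 : List Int) (out : List Int) : Prop := out = find_common_signals_alt signals1 signals2
instance (signals1 : List Int) (signals2 : List Int) (out : List Int) : Decidable (Spec_find_common_signals signals1 signals2 out) := by unfold Spec_find_common_signals; infer_instance

-- ===== CLAIM (what is proved, stated in full; the proofs are below) =====
def Claim_equal_find_common_signals : Prop := ∀ (signals1 : List Int) (signals2 : List Int), Dom_find_common_signals signals1 signals2 → Spec_find_common_signals signals1 signals2 (find_common_signals signals1 signals2)

-- ===== LEMMAS AND PROOFS =====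

-- a pair-fold with independent components splits into two folds
theorem pvFoldlPair (l : List Int) (f g : Int → Int → Int) (a b : Int) :
    l.foldl (fun (p : Int × Int) x => (f p.1 x, g p.2 x)) (a, b)
      = (l.foldl f a, l.foldl g b) := by
  induction l generalizing a b with
  | nil => rfl
  | cons x t ih => simp [List.foldl, ih]

-- counting members of e :: t splits when e ∉ t
theorem pvCountPCons (xs : List Int) (e : Int) (t : List Int) (he : e ∉ t) :
    xs.countP (fun x => decide (x ∈ e :: t))
      = xs.count e + xs.countP (fun x => decide (x ∈ t)) := by
  induction xs with
  | nil => rfl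
  | cons x xs ih =>
    simp only [List.countP_cons, List.count_cons, ih]
    by_cases hx : x = e
    · subst hx
      simp [he]
      omega
    · by_cases hxt : x ∈ t <;> simp [hx, hxt] <;> omega

-- summing .count over a duplicate-free list = one countP membership pass
theorem pvFoldlCount (t : List Int) (xs : List Int) (c : Int) (h : t.Nodup) :
    t.foldl (fun acc e => acc + (xs.count e : Int)) c
      = c + (xs.countP (fun x => decide (x ∈ t)) : Int) := by
  induction t generalizing c with
  | nil => simp
  | cons e t ih =>
    have he : e ∉ t := (List.nodup_cons.mp h).1
    have ht : t.Nodup := (List.nodup_cons.mp h).2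
    simp only [List.foldl, ih _ ht, pvCountPCons xs e t he]
    push_cast
    ring

-- a conditional +1 fold is a countP
theorem pvFoldlIf (xs : List Int) (p : Int → Bool) (c : Int) :
    xs.foldl (fun acc x => if p x then acc + 1 else acc) c
      = c + (xs.countP p : Int) := by
  induction xs generalizing c with
  | nil => simp
  | cons x xs ih =>
    simp only [List.foldl, List.countP_cons, ih]
    by_cases hx : p x <;> simp [hx] <;> omega

-- A's pair-fold over the common set, specialised, split by pvFoldlPair
theorem pvFoldlPairCount (l s1 s2 : List Int) (a b : Int) :
    l.foldl (fun (p : Int × Int) e => (p.1 + (s1.count e : Int), p.2 + (s2.count e : Int))) (a, b)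
      = (l.foldl (fun acc e => acc + (s1.count e : Int)) a,
         l.foldl (fun acc e => acc + (s2.count e : Int)) b) :=
  pvFoldlPair l (fun acc e => acc + (s1.count e : Int)) (fun acc e => acc + (s2.count e : Int)) a b

-- Set.contains as the decidable membership predicate
theorem pvContainsEq (s : List Int) (x : Int) :
    PySem.Set.contains s x = decide (x ∈ s) := by
  by_cases h : x ∈ s
  · simp [h]
  · simp [h]

-- ===== VERDICT (by name: the statement is the Claim_ definition above) =====
theorem find_common_signals_spec : Claim_equal_find_common_signals := by
  intro signals1 signals2 _
  unfold Spec_find_common_signals find_common_signals find_common_signals_alt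
  have hnd : (PySem.Set.inter (PySem.Set.ofList signals1) (PySem.Set.ofList signals2)).Nodup :=
    PySem.Set.nodup_inter _ _ (PySem.Set.nodup_ofList _)
  simp only [pvFoldlPairCount, pvFoldlCount _ _ _ hnd, pvFoldlIf, pvContainsEq]
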